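-- pv_equiv track=rewrite | github.com/rnine99/autoport-agent | src/ptc_agent/agent/middleware/background/middleware.py | _truncate_description
-- ===== SOURCE A (Python) =====
-- def _truncate_description(description: str, max_sentences: int = 2) -> str:
--     """Truncate description to first N sentences.
--
--     Args:
--         description: Full task description
--         max_sentences: Maximum number of sentences to keep
--
--     Returns:
--         Truncated description ending at the Nth period
--     """
--     sentences = []
--     remaining = description
--     for _ in range(max_sentences):
--         period_idx = remaining.find(".")
--         if period_idx == -1:
--             sentences.append(remaining)
--             break
--         sentences.append(remaining[: period_idx + 1])
--         remaining = remaining[period_idx + 1 :].lstrip()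
--         if not remaining:
--             break
--     return " ".join(sentences)
-- ===== SOURCE B (Python) =====
-- def _truncate_description(description: str, max_sentences: int = 2) -> str:
--     """Truncate description to first N sentences (split-once reformulation)."""
--     chunks = description.split(".")
--     last = len(chunks) - 1
--     pieces = []
--     for i in range(min(max_sentences, len(chunks))):
--         c = chunks[i] if i == 0 else chunks[i].lstrip()
--         if i < last:
--             pieces.append(c + ".")
--         elif c:
--             pieces.append(c)
--     return " ".join(pieces)
-- ===== Notes on version B (the rewrite author's own statement) =====
-- stated objective: alternative
-- what changed: B splits the description on '.' once and assembles the kept pieces from the chunk list (lstrip-ing every chunk but the first and skipping the empty trailing chunk), instead of A's loop that repeatedly finds the next period and slices/lstrips the shrinking remainder.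
import Mathlib
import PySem

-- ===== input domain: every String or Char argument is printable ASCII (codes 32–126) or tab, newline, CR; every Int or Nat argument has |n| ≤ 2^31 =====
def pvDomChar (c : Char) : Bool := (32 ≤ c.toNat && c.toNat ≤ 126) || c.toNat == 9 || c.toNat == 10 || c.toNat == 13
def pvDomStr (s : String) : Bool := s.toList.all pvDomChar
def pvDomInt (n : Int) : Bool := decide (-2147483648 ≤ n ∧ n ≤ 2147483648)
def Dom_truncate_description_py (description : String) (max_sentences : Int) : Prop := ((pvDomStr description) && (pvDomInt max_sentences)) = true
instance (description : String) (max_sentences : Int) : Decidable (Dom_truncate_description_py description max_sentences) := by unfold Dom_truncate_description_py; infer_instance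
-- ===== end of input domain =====

-- B splits the string on '.' once and assembles the kept sentences from the chunk list,
-- instead of A's repeated find/slice/lstrip loop on the shrinking remainder (objective: alternative decomposition).

-- ===== PORT A =====
-- the 'for _ in range(max_sentences)' loop of A; state = (remaining, sentences), fuel = loop counter
def pvLoopA (fuel : Nat) (remaining : List Char) (sentences : List (List Char)) : List (List Char) :=
  match fuel with
  | 0 => sentences
  | fuel + 1 =>
    let period_idx := PySem.Chars.find remaining ['.']
    if period_idx = -1 then sentences ++ [remaining]
    else
      let sentences' := sentences ++ [PySem.List.slice remaining none (some (period_idx + 1))]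
      let remaining' := PySem.Chars.lstrip (PySem.List.slice remaining (some (period_idx + 1)) none)
      if remaining' = [] then sentences' else pvLoopA fuel remaining' sentences'

def truncate_description_py (description : String) (max_sentences : Int) : String :=
  String.mk (PySem.Chars.join [' '] (pvLoopA max_sentences.toNat description.toList []))

-- ===== PORT B =====
def truncate_description_py_alt (description : String) (max_sentences : Int) : String :=
  let chunks := PySem.Chars.splitOn description.toList ['.']
  let last : Int := (chunks.length : Int) - 1
  let n : Int := min max_sentences (chunks.length : Int)
  let pieces := (PySem.List.pyRange 0 n 1).foldl (fun acc i =>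
      let c := if i = 0 then PySem.List.pyGetD chunks i []
               else PySem.Chars.lstrip (PySem.List.pyGetD chunks i [])
      if i < last then acc ++ [c ++ ['.']]
      else if c ≠ [] then acc ++ [c]
      else acc) []
  String.mk (PySem.Chars.join [' '] pieces)

-- ===== PRECONDITION & SPEC =====
def Spec_truncate_description_py (description : String) (max_sentences : Int) (out : String) : Prop := out = truncate_description_py_alt description max_sentences
instance (description : String) (max_sentences : Int) (out : String) : Decidable (Spec_truncate_description_py description max_sentences out) := by unfold Spec_truncate_description_py; infer_instance

-- ===== CLAIM (what is proved, stated in full; the proofs are below) =====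
def Claim_equal_truncate_description_py : Prop := ∀ (description : String) (max_sentences : Int), Dom_truncate_description_py description max_sentences → Spec_truncate_description_py description max_sentences (truncate_description_py description max_sentences)

-- ===== LEMMAS AND PROOFS =====

-- split of a list of chars on a single '.' (proof-side characterisation)
def pvSp : List Char → List (List Char)
  | [] => [[]]
  | c :: t => if c = '.' then [] :: pvSp t else (pvSp t).modifyHead (c :: ·)

-- B's piece-collecting loop, as a recursion over the chunk list (proof-side characterisation)
def pvBRec : Nat → Bool → List (List Char) → List (List Char)
  | 0, _, _ => []
  | _ + 1, _, [] => []
  | k + 1, first, c :: cs =>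
    let c' := if first then c else PySem.Chars.lstrip c
    if cs.isEmpty then (if c' = [] then [] else [c'])
    else (c' ++ ['.']) :: pvBRec k false cs

theorem pvSp_ne_nil (s : List Char) : pvSp s ≠ [] := by
  induction s with
  | nil => simp [pvSp]
  | cons c t ih =>
    simp only [pvSp]
    split
    · simp
    · cases h : pvSp t with
      | nil => exact absurd h ih
      | cons a l => simp

theorem pvSplitOn_go_eq (s : List Char) : ∀ (fuel : Nat) (cur : List Char) (acc : List (List Char)),
    s.length < fuel →
    PySem.Chars.splitOn.go ['.'] fuel s cur acc = acc.reverse ++ (pvSp s).modifyHead (cur.reverse ++ ·) := by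
  induction s with
  | nil =>
    intro fuel cur acc h
    match fuel with
    | f + 1 => rw [PySem.Chars.splitOn.go.eq_def]; simp [pvSp]
  | cons c t ih =>
    intro fuel cur acc h
    match fuel with
    | f + 1 =>
      rw [PySem.Chars.splitOn.go.eq_def]
      simp only []
      by_cases hc : c = '.'
      · have hp : List.isPrefixOf ['.'] (c :: t) = true := by
          simp [List.isPrefixOf, hc]
        rw [if_pos hp]
        have := ih f [] (cur.reverse :: acc) (by simpa using h)
        simp only [List.drop_succ_cons, List.length_singleton, List.drop_zero] at this ⊢
        rw [this]
        subst hc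
        simp only [pvSp]
        cases hsp : pvSp t with
        | nil => exact absurd hsp (pvSp_ne_nil t)
        | cons a l => simp
      · have hp : List.isPrefixOf ['.'] (c :: t) = false := by
          simp [List.isPrefixOf]
          exact fun hh => (hc hh.symm).elim
        rw [if_neg (by simp [hp])]
        rw [ih f (c :: cur) acc (by simpa using h)]
        simp only [pvSp, if_neg hc]
        cases hsp : pvSp t with
        | nil => exact absurd hsp (pvSp_ne_nil t)
        | cons a l => simp

theorem pvSplitOn_eq (s : List Char) : PySem.Chars.splitOn s ['.'] = pvSp s := by
  have h := pvSplitOn_go_eq s (s.length + 1) [] [] (by omega)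
  cases hsp : pvSp s with
  | nil => exact absurd hsp (pvSp_ne_nil s)
  | cons a l =>
    rw [hsp] at h
    simpa [PySem.Chars.splitOn] using h

theorem pvFindGo_no_dot (a : List Char) : ∀ (x : Nat), '.' ∉ a → PySem.Chars.find.go ['.'] a x = -1 := by
  induction a with
  | nil => intro x _; rw [PySem.Chars.find.go.eq_1]; simp
  | cons c t ih =>
    intro x hna
    rw [PySem.Chars.find.go.eq_2]
    have hc : c ≠ '.' := fun h => hna (by simp [h])
    have hp : List.isPrefixOf ['.'] (c :: t) = false := by
      simp [List.isPrefixOf]; exact fun hh => (hc hh.symm).elim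
    rw [if_neg (by simp [hp])]
    exact ih (x + 1) (fun h => hna (by simp [h]))

theorem pvFindGo_dot (a : List Char) : ∀ (b : List Char) (x : Nat), '.' ∉ a →
    PySem.Chars.find.go ['.'] (a ++ '.' :: b) x = (x : Int) + a.length := by
  induction a with
  | nil =>
    intro b x _
    rw [List.nil_append, PySem.Chars.find.go.eq_2]
    simp [List.isPrefixOf]
  | cons c t ih =>
    intro b x hna
    have hc : c ≠ '.' := fun h => hna (by simp [h])
    rw [List.cons_append, PySem.Chars.find.go.eq_2]
    have hp : List.isPrefixOf ['.'] (c :: (t ++ '.' :: b)) = false := by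
      simp [List.isPrefixOf]; exact fun hh => (hc hh.symm).elim
    rw [if_neg (by simp [hp]), ih b (x + 1) (fun h => hna (by simp [h]))]
    simp; omega

theorem pvSp_no_dot (s : List Char) (h : '.' ∉ s) : pvSp s = [s] := by
  induction s with
  | nil => rfl
  | cons c t ih =>
    have hc : c ≠ '.' := fun hh => h (by simp [hh])
    simp only [pvSp, if_neg hc, ih (fun hh => h (by simp [hh]))]
    rfl

theorem pvSp_append (a : List Char) (b : List Char) (h : '.' ∉ a) :
    pvSp (a ++ '.' :: b) = a :: pvSp b := by
  induction a with
  | nil => simp [pvSp]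
  | cons c t ih =>
    have hc : c ≠ '.' := fun hh => h (by simp [hh])
    simp only [List.cons_append, pvSp, if_neg hc, ih (fun hh => h (by simp [hh]))]
    rfl

theorem pvDot_decomp (s : List Char) (h : '.' ∈ s) :
    ∃ a b, s = a ++ '.' :: b ∧ '.' ∉ a := by
  induction s with
  | nil => simp at h
  | cons c t ih =>
    by_cases hc : c = '.'
    · exact ⟨[], t, by simp [hc], by simp⟩
    · have : '.' ∈ t := by
        rcases List.mem_cons.mp h with h1 | h1
        · exact absurd h1.symm hc
        · exact h1
      obtain ⟨a, b, hab, hna⟩ := ih this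
      exact ⟨c :: a, b, by simp [hab], by simp [hna]; exact fun hh => hc hh.symm⟩

theorem pvIsspace_ne_dot (c : Char) (h : PySem.Chars.isspace c = true) : c ≠ '.' := by
  intro hc; subst hc; exact absurd h (by decide)

theorem pvSp_lstrip (s : List Char) :
    pvSp (PySem.Chars.lstrip s) = (pvSp s).modifyHead PySem.Chars.lstrip := by
  induction s with
  | nil => simp [pvSp, PySem.Chars.lstrip]
  | cons c t ih =>
    by_cases hws : PySem.Chars.isspace c = true
    · have hc := pvIsspace_ne_dot c hws
      have h1 : PySem.Chars.lstrip (c :: t) = PySem.Chars.lstrip t := by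
        simp [PySem.Chars.lstrip, hws]
      rw [h1, ih]
      simp only [pvSp, if_neg hc]
      cases hsp : pvSp t with
      | nil => exact absurd hsp (pvSp_ne_nil t)
      | cons a l =>
        simp [PySem.Chars.lstrip, hws]
    · have h1 : PySem.Chars.lstrip (c :: t) = c :: t := by
        simp [PySem.Chars.lstrip, hws]
      rw [h1]
      by_cases hc : c = '.'
      · simp only [pvSp, if_pos hc]
        simp [PySem.Chars.lstrip]
      · simp only [pvSp, if_neg hc]
        cases hsp : pvSp t with
        | nil => exact absurd hsp (pvSp_ne_nil t)
        | cons a l =>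
          simp [PySem.Chars.lstrip, hws]

theorem pvLstrip_nil_no_dot (s : List Char) (h : PySem.Chars.lstrip s = []) : '.' ∉ s := by
  intro hmem
  have := (List.dropWhile_eq_nil_iff).mp h '.' hmem
  exact absurd this (by decide)

theorem pvBRec_false (k : Nat) (cs : List (List Char)) :
    pvBRec k false cs = pvBRec k true (cs.modifyHead PySem.Chars.lstrip) := by
  cases k with
  | zero => cases cs <;> rfl
  | succ k => cases cs <;> rfl

theorem pvBRec_min (k : Nat) (first : Bool) (cs : List (List Char)) :
    pvBRec k first cs = pvBRec (min k cs.length) first cs := by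
  induction k generalizing first cs with
  | zero => simp
  | succ k ih =>
    cases cs with
    | nil => simp [pvBRec]
    | cons c cs' =>
      cases cs' with
      | nil => simp [pvBRec]
      | cons d t =>
        have hmin : min (k + 1) (c :: d :: t).length = min k (d :: t).length + 1 := by
          simp only [List.length_cons]; omega
        rw [hmin]
        simp only [pvBRec]
        rw [ih false (d :: t)]

theorem pvLoopA_append (f : Nat) (r : List Char) (acc : List (List Char)) :
    pvLoopA f r acc = acc ++ pvLoopA f r [] := by
  induction f generalizing r acc with
  | zero => simp [pvLoopA]
  | succ f ih =>
    simp only [pvLoopA]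
    split
    · rfl
    · split
      · rfl
      · rw [ih _ (acc ++ _), ih _ ([] ++ _)]
        simp

-- the main correspondence: A's loop produces exactly B's pieces, chunk by chunk
theorem pvMain (f : Nat) : ∀ (r : List Char), r ≠ [] →
    pvLoopA f r [] = pvBRec f true (pvSp r) := by
  induction f with
  | zero => intro r _; rfl
  | succ f ih =>
    intro r hr
    by_cases hdot : '.' ∈ r
    · obtain ⟨a, b, hab, hna⟩ := pvDot_decomp r hdot
      subst hab
      have hfind : PySem.Chars.find (a ++ '.' :: b) ['.'] = (a.length : Int) := by
        simpa using pvFindGo_dot a b 0 hna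
      have hne : (a.length : Int) ≠ -1 := by omega
      have htake : PySem.List.slice (a ++ '.' :: b) none (some ((a.length : Int) + 1)) = a ++ ['.'] := by
        rw [PySem.List.slice_to _ (by omega)]
        have : ((a.length : Int) + 1).toNat = a.length + 1 := by omega
        rw [this]
        rw [List.take_append]
        simp
      have hdrop : PySem.List.slice (a ++ '.' :: b) (some ((a.length : Int) + 1)) none = b := by
        rw [PySem.List.slice_from _ (by omega)]
        have : ((a.length : Int) + 1).toNat = a.length + 1 := by omega
        rw [this]
        rw [List.drop_append]
        simp
      simp only [pvLoopA, hfind, if_neg hne, htake, hdrop]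
      rw [pvSp_append a b hna]
      by_cases hb : PySem.Chars.lstrip b = []
      · rw [if_pos hb]
        have hnb : '.' ∉ b := pvLstrip_nil_no_dot b hb
        rw [pvSp_no_dot b hnb]
        cases f with
        | zero => simp [pvBRec]
        | succ f => simp [pvBRec, hb]
      · rw [if_neg hb, pvLoopA_append, ih _ hb, pvSp_lstrip]
        simp only [pvBRec]
        rw [if_neg (by simpa using pvSp_ne_nil b), pvBRec_false]
        simp
    · have hfind : PySem.Chars.find r ['.'] = -1 := by
        simpa [PySem.Chars.find] using pvFindGo_no_dot r 0 hdot
      rw [pvSp_no_dot r hdot]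
      simp [pvLoopA, hfind, pvBRec, hr]

-- B's index loop over range(n), read as a recursion over the chunk list
theorem pvFold_eq_bRec (cs : List (List Char)) : ∀ (k j : Nat) (acc : List (List Char)),
    j + k ≤ cs.length →
    (List.range' j k).foldl (fun acc i =>
        let c := if i = 0 then cs.getD i [] else PySem.Chars.lstrip (cs.getD i [])
        if (i : Int) < (cs.length : Int) - 1 then acc ++ [c ++ ['.']]
        else if c ≠ [] then acc ++ [c]
        else acc) acc
      = acc ++ pvBRec k (decide (j = 0)) (cs.drop j) := by
  intro k
  induction k with
  | zero =>
    intro j acc _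
    cases h : cs.drop j <;> simp [pvBRec]
  | succ k ih =>
    intro j acc hjk
    have hj : j < cs.length := by omega
    obtain ⟨c, rest, hdrop⟩ : ∃ c rest, cs.drop j = c :: rest := by
      cases h : cs.drop j with
      | nil => exfalso; have := List.drop_eq_nil_iff.mp h; omega
      | cons c rest => exact ⟨c, rest, rfl⟩
    have hget : cs.getD j [] = c := by
      have h2 : (cs.drop j)[0]? = some c := by rw [hdrop]; rfl
      rw [List.getElem?_drop] at h2
      simp only [Nat.add_zero] at h2
      simp [List.getD, h2]
    have hrest : cs.drop (j + 1) = rest := by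
      have h3 : (cs.drop j).drop 1 = cs.drop (j + 1) := by
        rw [List.drop_drop]
      rw [← h3, hdrop]
      rfl
    have hlen : j + 1 + rest.length = cs.length := by
      have hld := List.length_drop (l := cs) (i := j)
      rw [hdrop] at hld
      simp only [List.length_cons] at hld
      omega
    rw [List.range'_succ]
    simp only [List.foldl_cons]
    rw [ih (j + 1) _ (by omega), hrest, hdrop]
    simp only [hget]
    cases rest with
    | nil =>
      simp only [List.length_nil] at hlen
      have hkz : ∀ b, pvBRec k b [] = [] := by intro b; cases k <;> rfl
      have hnlt : ¬ ((j : Int) < (cs.length : Int) - 1) := by omega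
      rw [if_neg hnlt, hkz]
      simp only [pvBRec, List.isEmpty_nil]
      by_cases hj0 : j = 0
      · simp only [hj0, decide_true]
        by_cases hce : c = []
        · simp [hce]
        · simp [hce]
      · simp only [if_neg hj0]
        by_cases hce : PySem.Chars.lstrip c = []
        · simp [hce, hj0]
        · simp [hce, hj0]
    | cons d t =>
      simp only [List.length_cons] at hlen
      have hlt : ((j : Int) < (cs.length : Int) - 1) := by omega
      rw [if_pos hlt]
      simp only [pvBRec]
      by_cases hj0 : j = 0
      · simp [hj0]
      · simp [hj0]

theorem pvPyRange_nonpos (n : Int) (h : n ≤ 0) : PySem.List.pyRange 0 n 1 = [] := by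
  simp only [PySem.List.pyRange]
  rw [if_neg (by omega)]
  simp only [if_pos (by omega : (0:Int) < 1)]
  rw [if_neg (by omega)]
  simp

-- B's piece list, rewritten from the Int-indexed range fold to the chunk recursion
theorem pvAltPieces (cs : List (List Char)) (m : Int) (hcs : cs ≠ []) :
    (PySem.List.pyRange 0 (min m (cs.length : Int)) 1).foldl
      (fun acc i =>
        if i < (cs.length : Int) - 1 then
          acc ++ [(if i = 0 then PySem.List.pyGetD cs i [] else PySem.Chars.lstrip (PySem.List.pyGetD cs i [])) ++ ['.']]
        else
          if (if i = 0 then PySem.List.pyGetD cs i [] else PySem.Chars.lstrip (PySem.List.pyGetD cs i [])) ≠ [] then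
            acc ++ [if i = 0 then PySem.List.pyGetD cs i [] else PySem.Chars.lstrip (PySem.List.pyGetD cs i [])]
          else acc) []
    = pvBRec (min m.toNat cs.length) true cs := by
  by_cases hm : m ≤ 0
  · rw [pvPyRange_nonpos _ (by omega : min m (cs.length : Int) ≤ 0)]
    have h0 : m.toNat = 0 := by omega
    simp [h0, pvBRec]
  · have hlen : 1 ≤ cs.length := by
      cases cs with
      | nil => exact absurd rfl hcs
      | cons a t => simp
    have hcast : min m (cs.length : Int) = ((min m.toNat cs.length : Nat) : Int) := by
      simp only [Nat.cast_min]
      omega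
    rw [hcast, PySem.List.pyRange_zero_natCast, List.foldl_map]
    rw [show List.range (min m.toNat cs.length) = List.range' 0 (min m.toNat cs.length) from
      List.range_eq_range']
    refine Eq.trans (PySem.List.foldl_congr_mem _ _ (g := fun acc (j : Nat) =>
        let c := if j = 0 then cs.getD j [] else PySem.Chars.lstrip (cs.getD j [])
        if (j : Int) < (cs.length : Int) - 1 then acc ++ [c ++ ['.']]
        else if c ≠ [] then acc ++ [c]
        else acc) _
      (by
        intro acc j _
        by_cases hj : j = 0
        · simp [hj, PySem.List.pyGetD_ofNat', List.getD]
        · simp [hj, PySem.List.pyGetD_natCast])) ?_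
    rw [pvFold_eq_bRec cs (min m.toNat cs.length) 0 [] (by simp)]
    simp

-- ===== VERDICT (by name: the statement is the Claim_ definition above) =====
theorem truncate_description_py_spec : Claim_equal_truncate_description_py := by
  intro description max_sentences _
  simp only [Spec_truncate_description_py, truncate_description_py, truncate_description_py_alt,
    pvSplitOn_eq]
  rw [pvAltPieces (pvSp description.toList) max_sentences (pvSp_ne_nil _)]
  generalize description.toList = l
  cases hl : l with
  | nil =>
    cases hf : max_sentences.toNat with
    | zero => rfl
    | succ n =>
      have hfind : PySem.Chars.find ([] : List Char) ['.'] = -1 := rfl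
      simp [pvLoopA, hfind, pvSp, pvBRec, PySem.Chars.join, List.intercalate]
  | cons c t =>
    rw [pvMain max_sentences.toNat (c :: t) (by simp), pvBRec_min]
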